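-- pv_equiv track=rewrite | github.com/ushikiro34/stock_analysis_short | backend/backtest/analytics.py | calculate_consecutive_stats
-- ===== SOURCE A (Python) =====
-- from typing import List, Dict
--
-- def calculate_consecutive_stats(trades: List[Dict]) -> Dict:
--     """
--     연속 승/패 통계
--
--     Returns:
--         {
--             "max_consecutive_wins": 최대 연승,
--             "max_consecutive_losses": 최대 연패,
--             "current_streak": 현재 연속 기록
--         }
--     """
--     if not trades:
--         return {
--             "max_consecutive_wins": 0,
--             "max_consecutive_losses": 0,
--             "current_streak": 0
--         }
--
--     max_wins = 0
--     max_losses = 0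
--     current_wins = 0
--     current_losses = 0
--
--     for trade in trades:
--         profit = trade.get("profit_loss", 0)
--
--         if profit > 0:
--             current_wins += 1
--             current_losses = 0
--             max_wins = max(max_wins, current_wins)
--         elif profit < 0:
--             current_losses += 1
--             current_wins = 0
--             max_losses = max(max_losses, current_losses)
--
--     current_streak = current_wins if current_wins > 0 else -current_losses
--
--     return {
--         "max_consecutive_wins": max_wins,
--         "max_consecutive_losses": max_losses,
--         "current_streak": current_streak
--     }
-- ===== SOURCE B (Python) =====
-- from itertools import groupby
-- from typing import List, Dict
--
-- def calculate_consecutive_stats(trades: List[Dict]) -> Dict: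
--     # Build the sign sequence: +1 per win, -1 per loss; zeros dropped (they
--     # neither extend nor break a streak, matching the task's semantics).
--     signs = []
--     for trade in trades:
--         p = trade.get("profit_loss", 0)
--         if p > 0:
--             signs.append(1)
--         elif p < 0:
--             signs.append(-1)
--     max_wins = 0
--     max_losses = 0
--     streak = 0
--     for sign, grp in groupby(signs):
--         n = sum(1 for _ in grp)
--         if sign == 1:
--             max_wins = max(max_wins, n)
--             streak = n
--         else:
--             max_losses = max(max_losses, n)
--             streak = -n
--     return {
--         "max_consecutive_wins": max_wins,
--         "max_consecutive_losses": max_losses,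
--         "current_streak": streak,
--     }
-- ===== Notes on version B (the rewrite author's own statement) =====
-- stated objective: alternative
-- what changed: Instead of A's single scan with four mutable counters, B first extracts a zero-filtered sign sequence (+1/-1 per winning/losing trade), groups it into maximal runs with itertools.groupby, and folds over the runs to get the two maxima and the signed current streak.
import Mathlib
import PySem

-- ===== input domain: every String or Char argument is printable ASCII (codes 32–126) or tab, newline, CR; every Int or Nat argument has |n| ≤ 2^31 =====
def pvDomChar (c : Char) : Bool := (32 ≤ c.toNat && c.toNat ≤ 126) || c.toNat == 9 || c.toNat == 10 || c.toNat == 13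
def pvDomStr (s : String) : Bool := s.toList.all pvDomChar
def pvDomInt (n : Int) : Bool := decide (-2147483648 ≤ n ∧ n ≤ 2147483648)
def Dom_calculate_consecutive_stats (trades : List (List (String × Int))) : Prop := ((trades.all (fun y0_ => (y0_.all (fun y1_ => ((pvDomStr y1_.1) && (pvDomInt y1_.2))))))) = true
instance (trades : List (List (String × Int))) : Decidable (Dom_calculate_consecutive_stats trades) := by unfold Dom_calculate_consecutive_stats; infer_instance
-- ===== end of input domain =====

-- B replaces A's four-counter scan by a zero-filtered sign sequence grouped into runs
-- (itertools.groupby) and a fold over the runs; objective: alternative decomposition, not faster.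

-- ===== PORT A =====
-- A's loop state: (max_wins, max_losses, current_wins, current_losses)
def pvStepA (st : Int × Int × Int × Int) (trade : List (String × Int)) : Int × Int × Int × Int :=
  let profit := (PySem.Dict.mk trade).getD "profit_loss" 0
  if 0 < profit then (max st.1 (st.2.2.1 + 1), st.2.1, st.2.2.1 + 1, 0)
  else if profit < 0 then (st.1, max st.2.1 (st.2.2.2 + 1), 0, st.2.2.2 + 1)
  else st

def calculate_consecutive_stats (trades : List (List (String × Int))) : List (String × Int) :=
  if trades = [] then
    [("max_consecutive_wins", 0), ("max_consecutive_losses", 0), ("current_streak", 0)]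
  else
    let st := trades.foldl pvStepA (0, 0, 0, 0)
    let current_streak := if 0 < st.2.2.1 then st.2.2.1 else -st.2.2.2
    [("max_consecutive_wins", st.1), ("max_consecutive_losses", st.2.1), ("current_streak", current_streak)]

-- ===== PORT B =====
-- the filtered sign sequence: +1 per win, -1 per loss, zeros dropped
def pvSigns (trades : List (List (String × Int))) : List Int :=
  trades.filterMap (fun trade =>
    let p := (PySem.Dict.mk trade).getD "profit_loss" 0
    if 0 < p then some 1 else if p < 0 then some (-1) else none)

-- itertools.groupby: maximal runs (sign, length), pending run (x, n)
def pvRuns (x : Int) (n : Int) : List Int → List (Int × Int)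
  | [] => [(x, n)]
  | y :: ys => if y = x then pvRuns x (n + 1) ys else (x, n) :: pvRuns y 1 ys

-- B's loop over the runs: (max_wins, max_losses, current_streak)
def pvStepB (acc : Int × Int × Int) (r : Int × Int) : Int × Int × Int :=
  if r.1 = 1 then (max acc.1 r.2, acc.2.1, r.2) else (acc.1, max acc.2.1 r.2, -r.2)

def calculate_consecutive_stats_alt (trades : List (List (String × Int))) : List (String × Int) :=
  let runs : List (Int × Int) :=
    match pvSigns trades with
    | [] => []
    | x :: xs => pvRuns x 1 xs
  let acc := runs.foldl pvStepB (0, 0, 0)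
  [("max_consecutive_wins", acc.1), ("max_consecutive_losses", acc.2.1), ("current_streak", acc.2.2)]

-- ===== PRECONDITION & SPEC =====
def Spec_calculate_consecutive_stats (trades : List (List (String × Int))) (out : List (String × Int)) : Prop := out = calculate_consecutive_stats_alt trades
instance (trades : List (List (String × Int))) (out : List (String × Int)) : Decidable (Spec_calculate_consecutive_stats trades out) := by unfold Spec_calculate_consecutive_stats; infer_instance

-- ===== CLAIM (what is proved, stated in full; the proofs are below) =====
def Claim_equal_calculate_consecutive_stats : Prop := ∀ (trades : List (List (String × Int))), Dom_calculate_consecutive_stats trades → Spec_calculate_consecutive_stats trades (calculate_consecutive_stats trades)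

-- ===== LEMMAS AND PROOFS =====

-- A's step on a trade only looks at the sign of the profit; over the sign list it is pvStepS
def pvStepS (st : Int × Int × Int × Int) (a : Int) : Int × Int × Int × Int :=
  if 0 < a then (max st.1 (st.2.2.1 + 1), st.2.1, st.2.2.1 + 1, 0)
  else if a < 0 then (st.1, max st.2.1 (st.2.2.2 + 1), 0, st.2.2.2 + 1)
  else st

lemma foldA_eq_foldS (trades : List (List (String × Int))) (st : Int × Int × Int × Int) :
    trades.foldl pvStepA st = (pvSigns trades).foldl pvStepS st := by
  induction trades generalizing st with
  | nil => rfl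
  | cons t ts ih =>
    simp only [pvSigns, List.filterMap_cons] at *
    by_cases h1 : 0 < (PySem.Dict.mk t).getD "profit_loss" 0
    · simp [pvStepA, pvStepS, h1, ih]
    · by_cases h2 : (PySem.Dict.mk t).getD "profit_loss" 0 < 0
      · simp only [List.foldl_cons, if_neg h1, if_pos h2]
        rw [show pvStepA st t = (st.1, max st.2.1 (st.2.2.2 + 1), 0, st.2.2.2 + 1) from by
          simp [pvStepA, h1, h2]]
        rw [show pvStepS st (-1) = (st.1, max st.2.1 (st.2.2.2 + 1), 0, st.2.2.2 + 1) from by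
          simp [pvStepS]]
        exact ih _
      · simp [pvStepA, pvStepS, h1, h2, ih]

lemma signs_mem (trades : List (List (String × Int))) :
    ∀ a ∈ pvSigns trades, a = 1 ∨ a = -1 := by
  intro a ha
  simp only [pvSigns, List.mem_filterMap] at ha
  obtain ⟨t, _, ht⟩ := ha
  split_ifs at ht <;> simp_all

-- component folds of pvStepB
def pvW (a : Int) (rs : List (Int × Int)) : Int :=
  rs.foldl (fun m r => if r.1 = 1 then max m r.2 else m) a
def pvL (b : Int) (rs : List (Int × Int)) : Int :=
  rs.foldl (fun m r => if r.1 = 1 then m else max m r.2) b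
def pvS (c : Int) (rs : List (Int × Int)) : Int :=
  rs.foldl (fun _ r => if r.1 = 1 then r.2 else -r.2) c

lemma foldB_eq (rs : List (Int × Int)) (a b c : Int) :
    rs.foldl pvStepB (a, b, c) = (pvW a rs, pvL b rs, pvS c rs) := by
  induction rs generalizing a b c with
  | nil => rfl
  | cons r rs ih =>
    simp only [pvW, pvL, pvS, List.foldl_cons, pvStepB] at *
    split_ifs <;> simp [ih]

lemma pvW_absorb (s : List Int) (k a a' : Int) (h : max a k = max a' k) :
    pvW a (pvRuns 1 k s) = pvW a' (pvRuns 1 k s) := by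
  induction s generalizing k a a' with
  | nil => simpa [pvRuns, pvW]
  | cons y ys ih =>
    by_cases hy : y = 1
    · subst hy
      simp only [pvRuns, if_pos rfl]
      exact ih (k + 1) a a' (by omega)
    · simp only [pvRuns, if_neg hy, pvW, List.foldl_cons]
      simp [h]

lemma pvL_absorb (s : List Int) (k b b' : Int) (h : max b k = max b' k) :
    pvL b (pvRuns (-1) k s) = pvL b' (pvRuns (-1) k s) := by
  induction s generalizing k b b' with
  | nil => simpa [pvRuns, pvL]
  | cons y ys ih =>
    by_cases hy : y = -1
    · subst hy
      simp only [pvRuns, if_pos rfl]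
      exact ih (k + 1) b b' (by omega)
    · simp only [pvRuns, if_neg hy, pvL, List.foldl_cons]
      simp [h]

lemma pvS_absorb (s : List Int) (x k c c' : Int) :
    pvS c (pvRuns x k s) = pvS c' (pvRuns x k s) := by
  induction s generalizing x k c c' with
  | nil => simp [pvRuns, pvS]
  | cons y ys ih =>
    by_cases hy : y = x
    · subst hy; simp only [pvRuns, if_pos rfl]; exact ih _ _ _ _
    · simp only [pvRuns, if_neg hy, pvS, List.foldl_cons]

lemma pvW_cons (a : Int) (r : Int × Int) (rs : List (Int × Int)) :
    pvW a (r :: rs) = pvW (if r.1 = 1 then max a r.2 else a) rs := rfl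
lemma pvL_cons (b : Int) (r : Int × Int) (rs : List (Int × Int)) :
    pvL b (r :: rs) = pvL (if r.1 = 1 then b else max b r.2) rs := rfl
lemma pvS_cons (c : Int) (r : Int × Int) (rs : List (Int × Int)) :
    pvS c (r :: rs) = pvS (if r.1 = 1 then r.2 else -r.2) rs := rfl

-- map B's final streak to A's (current_wins, current_losses)
def pvPost (t : Int × Int × Int) : Int × Int × Int × Int :=
  (t.1, t.2.1, if 0 < t.2.2 then t.2.2 else 0, if t.2.2 < 0 then -t.2.2 else 0)

-- the main invariant: A's fold from a pending-run state equals B's evaluation of the runs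
lemma main_inv (s : List Int) (hmem : ∀ a ∈ s, a = 1 ∨ a = -1) :
    (∀ n mw ml : Int, 1 ≤ n → n ≤ mw →
      s.foldl pvStepS (mw, ml, n, 0) = pvPost (pvW mw (pvRuns 1 n s), pvL ml (pvRuns 1 n s), pvS 0 (pvRuns 1 n s))) ∧
    (∀ n mw ml : Int, 1 ≤ n → n ≤ ml →
      s.foldl pvStepS (mw, ml, 0, n) = pvPost (pvW mw (pvRuns (-1) n s), pvL ml (pvRuns (-1) n s), pvS 0 (pvRuns (-1) n s))) := by
  induction s with
  | nil =>
    constructor <;> intro n mw ml h1 h2 <;>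
      simp [pvRuns, pvW, pvL, pvS, pvPost] <;> omega
  | cons y ys ih =>
    have hmem' : ∀ a ∈ ys, a = 1 ∨ a = -1 := fun a ha => hmem a (List.mem_cons_of_mem _ ha)
    have ihw := (ih hmem').1
    have ihl := (ih hmem').2
    have hy : y = 1 ∨ y = -1 := hmem y (List.mem_cons_self)
    constructor
    · intro n mw ml h1 h2
      rcases hy with hy | hy <;> subst hy
      · -- y = 1: run continues
        simp only [List.foldl_cons, pvStepS]
        rw [if_pos (by norm_num)]
        simp only [pvRuns, if_pos rfl]
        rw [ihw (n + 1) (max mw (n + 1)) ml (by omega) (by omega)]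
        rw [pvW_absorb ys (n + 1) (max mw (n + 1)) mw (by omega)]
        simp
      · -- y = -1: win run closes, loss run of length 1 opens
        simp only [List.foldl_cons, pvStepS]
        rw [if_neg (by norm_num), if_pos (by norm_num)]
        rw [show (0 : Int) + 1 = 1 from by norm_num]
        rw [ihl 1 mw (max ml 1) (by omega) (by omega)]
        rw [show pvRuns 1 n (-1 :: ys) = (1, n) :: pvRuns (-1) 1 ys from by simp [pvRuns]]
        rw [pvW_cons, pvL_cons, pvS_cons]
        norm_num [show max mw n = mw from by omega]
        rw [pvL_absorb ys 1 (max ml 1) ml (by omega), pvS_absorb ys (-1) 1 0 n]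
    · intro n mw ml h1 h2
      rcases hy with hy | hy <;> subst hy
      · -- y = 1: loss run closes, win run of length 1 opens
        simp only [List.foldl_cons, pvStepS]
        rw [if_pos (by norm_num)]
        rw [show (0 : Int) + 1 = 1 from by norm_num]
        rw [ihw 1 (max mw 1) ml (by omega) (by omega)]
        rw [show pvRuns (-1) n (1 :: ys) = (-1, n) :: pvRuns 1 1 ys from by simp [pvRuns]]
        rw [pvW_cons, pvL_cons, pvS_cons]
        norm_num [show max ml n = ml from by omega]
        rw [pvW_absorb ys 1 (max mw 1) mw (by omega), pvS_absorb ys 1 1 0 (-n)]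
      · -- y = -1: run continues
        simp only [List.foldl_cons, pvStepS]
        rw [if_neg (by norm_num), if_pos (by norm_num)]
        simp only [pvRuns, if_pos rfl]
        rw [ihl (n + 1) mw (max ml (n + 1)) (by omega) (by omega)]
        rw [pvL_absorb ys (n + 1) (max ml (n + 1)) ml (by omega)]
        simp

-- ===== VERDICT (by name: the statement is the Claim_ definition above) =====
theorem calculate_consecutive_stats_spec : Claim_equal_calculate_consecutive_stats := by
  intro trades _
  unfold Spec_calculate_consecutive_stats calculate_consecutive_stats calculate_consecutive_stats_alt
  by_cases hz : trades = []
  · subst hz; rfl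
  · rw [if_neg hz]
    rw [foldA_eq_foldS]
    rcases hs : pvSigns trades with _ | ⟨x, xs⟩
    · simp [hs, pvStepB]
    · have hmem := signs_mem trades
      rw [hs] at hmem
      have hx : x = 1 ∨ x = -1 := hmem x List.mem_cons_self
      have hmem' : ∀ a ∈ xs, a = 1 ∨ a = -1 := fun a ha => hmem a (List.mem_cons_of_mem _ ha)
      simp only [List.foldl_cons]
      rw [foldB_eq]
      rcases hx with hx | hx <;> subst hx
      · have h0 : pvStepS (0, 0, 0, 0) 1 = ((1 : Int), (0 : Int), (1 : Int), (0 : Int)) := by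
          simp [pvStepS]
        rw [h0, (main_inv xs hmem').1 1 1 0 (by omega) (by omega)]
        rw [pvW_absorb xs 1 1 0 (by omega)]
        simp only [pvPost]
        split_ifs <;> simp_all <;> omega
      · have h0 : pvStepS (0, 0, 0, 0) (-1) = ((0 : Int), (1 : Int), (0 : Int), (1 : Int)) := by
          simp [pvStepS]
        rw [h0, (main_inv xs hmem').2 1 0 1 (by omega) (by omega)]
        rw [pvL_absorb xs 1 1 0 (by omega)]
        simp only [pvPost]
        split_ifs <;> simp_all <;> omega
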